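-- pv_equiv track=rewrite | github.com/cursive-works/wagtail-plotly | wagtail_plotly/blocks/base.py | rstrip
-- ===== SOURCE A (Python) =====
-- def rstrip(row):
--     """
--     Remove empty and None values from the end of a row of data
--     """
--     count = 0
--
--     for v in reversed(row):
--         if v or v == 0:
--             break
--         count += 1
--
--     if count > 0:
--         return row[:-count]
--
--     return row
-- ===== SOURCE B (Python) =====
-- def rstrip(row):
--     """
--     Remove empty and None values from the end of a row of data
--     """
--     out = list(row)
--     while out:
--         v = out[-1]
--         if v or v == 0:
--             break
--         out.pop()
--     return out
-- ===== Notes on version B (the rewrite author's own statement) =====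
-- stated objective: alternative
-- what changed: Instead of counting trailing empties over reversed(row) and taking a negative slice, B copies the row and repeatedly pops the last element while it is empty, maintaining a shrinking list rather than a counter.
import Mathlib
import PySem

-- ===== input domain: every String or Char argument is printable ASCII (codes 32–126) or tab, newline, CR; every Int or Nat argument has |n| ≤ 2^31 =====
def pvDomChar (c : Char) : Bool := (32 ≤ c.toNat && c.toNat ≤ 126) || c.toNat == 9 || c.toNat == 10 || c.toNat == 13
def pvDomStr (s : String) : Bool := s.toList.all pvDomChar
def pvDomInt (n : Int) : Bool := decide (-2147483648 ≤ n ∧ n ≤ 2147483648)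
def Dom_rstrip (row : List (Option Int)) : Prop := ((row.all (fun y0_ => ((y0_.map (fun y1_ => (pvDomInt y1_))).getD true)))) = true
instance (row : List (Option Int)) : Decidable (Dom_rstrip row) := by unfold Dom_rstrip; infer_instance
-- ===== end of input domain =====

-- B replaces A's reversed-scan trailing-empty counter and negative slice by a copy of the
-- row from which trailing empty values are popped one by one (objective: alternative, same cost).

-- ===== PORT A =====
-- the 'for v in reversed(row): if v or v == 0: break; count += 1' loop
def rstripCount : List (Option Int) → Int → Int
  | [], count => count
  | v :: t, count => if (match v with | none => false | some n => n != 0) || v == some 0 then count else rstripCount t (count + 1)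

def rstrip (row : List (Option Int)) : List (Option Int) :=
  let count := rstripCount row.reverse 0
  if count > 0 then PySem.List.slice row none (some (-count)) else row

-- ===== PORT B =====
-- 'while out: v = out[-1]; if v or v == 0: break; out.pop()'
def rstripPop (out : List (Option Int)) : List (Option Int) :=
  if hne : out = [] then out
  else
    let v := out.getLast hne
    if (match v with | none => false | some n => n != 0) || v == some 0 then out
    else rstripPop out.dropLast
termination_by out.length
decreasing_by
  have := List.length_pos_of_ne_nil hne
  simp [List.length_dropLast]; omega

def rstrip_alt (row : List (Option Int)) : List (Option Int) := rstripPop row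

-- ===== PRECONDITION & SPEC =====
def Spec_rstrip (row : List (Option Int)) (out : List (Option Int)) : Prop := out = rstrip_alt row
instance (row : List (Option Int)) (out : List (Option Int)) : Decidable (Spec_rstrip row out) := by unfold Spec_rstrip; infer_instance

-- ===== CLAIM (what is proved, stated in full; the proofs are below) =====
def Claim_equal_rstrip : Prop := ∀ (row : List (Option Int)), Dom_rstrip row → Spec_rstrip row (rstrip row)

-- ===== LEMMAS AND PROOFS =====

-- number of leading Nones (applied to the reverse: number of trailing Nones)
def Wn (l : List (Option Int)) : Nat := (l.takeWhile (fun v : Option Int => v.isNone)).length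

-- 'v or v == 0' on an Optional[int] keeps exactly the non-None values
lemma cond_eq (v : Option Int) :
    ((match v with | none => false | some n => n != 0) || v == some 0) = v.isSome := by
  rcases v with _ | n
  · simp
  · by_cases h : n = 0 <;> simp [h]

lemma Wn_le_len (l : List (Option Int)) : Wn l ≤ l.length := by
  simpa [Wn] using (List.takeWhile_sublist _).length_le

lemma countA_eq (l : List (Option Int)) (c : Int) :
    rstripCount l c = c + (Wn l : Int) := by
  induction l generalizing c with
  | nil => simp [rstripCount, Wn]
  | cons v t ih =>
      show (if (match v with | none => false | some n => n != 0) || v == some 0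
        then c else rstripCount t (c + 1)) = c + (Wn (v :: t) : Int)
      rw [cond_eq]
      rcases v with _ | n
      · simp [Wn, ih, List.takeWhile] at *
        push_cast
        ring
      · simp [Wn, List.takeWhile]

lemma rstrip_eq_take (row : List (Option Int)) :
    rstrip row = row.take (row.length - Wn row.reverse) := by
  unfold rstrip
  rw [countA_eq, zero_add]
  by_cases h : Wn row.reverse = 0
  · have hlen : row.length ≤ row.length - Wn row.reverse := by omega
    simp [h, List.take_of_length_le hlen]
  · have hpos : (0 : Int) < (Wn row.reverse : Int) := by exact_mod_cast Nat.pos_of_ne_zero h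
    rw [if_pos hpos, PySem.List.slice_to_neg_natCast row (Wn row.reverse) (Nat.pos_of_ne_zero h)]

lemma pop_eq_take (l : List (Option Int)) :
    rstripPop l = l.take (l.length - Wn l.reverse) := by
  induction l using List.reverseRecOn with
  | nil => simp [rstripPop, Wn]
  | append_singleton m v ih =>
      have hne : m ++ [v] ≠ [] := by simp
      rw [rstripPop, dif_neg hne]
      have hlast : (m ++ [v]).getLast hne = v := by
        simpa using List.getLast_concat (l := m) (a := v)
      simp only [hlast, cond_eq]
      rcases v with _ | n
      · -- popped element is None: recurse on m, trailing count grows by one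
        have hW : Wn ((m ++ [none]).reverse) = 1 + Wn m.reverse := by
          simp [Wn, List.takeWhile]; omega
        have hle := Wn_le_len m.reverse
        simp only [List.length_reverse] at hle
        simp only [Option.isSome_none, Bool.false_eq_true, if_false, List.dropLast_concat]
        rw [ih, hW]
        simp only [List.length_append, List.length_cons, List.length_nil]
        rw [List.take_append_of_le_length (by omega)]
        congr 1
        omega
      · -- popped element is kept: the whole list is returned, no trailing Nones
        have hW : Wn ((m ++ [some n]).reverse) = 0 := by
          simp [Wn, List.takeWhile]
        simp only [Option.isSome_some, if_true, hW, Nat.sub_zero]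
        exact (List.take_of_length_le le_rfl).symm

-- ===== VERDICT (by name: the statement is the Claim_ definition above) =====
theorem rstrip_spec : Claim_equal_rstrip := by
  intro row _
  unfold Spec_rstrip rstrip_alt
  rw [rstrip_eq_take, pop_eq_take]
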